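-- pv_equiv track=rewrite | github.com/tanjimsourov/webbuilder-backend | notifications/services.py | _event_matches
-- ===== SOURCE A (Python) =====
-- from typing import Iterable
--
-- def _event_matches(subscriptions: Iterable[str], event: str) -> bool:
--     normalized = {str(item or "").strip() for item in subscriptions if str(item or "").strip()}
--     if not normalized:
--         return False
--     if event in normalized:
--         return True
--     wildcard = [value[:-1] for value in normalized if value.endswith("*")]
--     return any(event.startswith(prefix) for prefix in wildcard)
-- ===== SOURCE B (Python) =====
-- def _event_matches(subscriptions, event):
--     for item in subscriptions:
--         value = str(item or "").strip()
--         if not value: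
--             continue
--         if value == event:
--             return True
--         if value.endswith("*") and event.startswith(value[:-1]):
--             return True
--     return False
-- ===== Notes on version B (the rewrite author's own statement) =====
-- stated objective: simpler
-- what changed: Replaces the two-phase approach (materialize a normalized set, test membership, then build a wildcard prefix list and scan it) with a single short-circuiting loop over subscriptions that tests each stripped value for an exact or wildcard match immediately.
import Mathlib
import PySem

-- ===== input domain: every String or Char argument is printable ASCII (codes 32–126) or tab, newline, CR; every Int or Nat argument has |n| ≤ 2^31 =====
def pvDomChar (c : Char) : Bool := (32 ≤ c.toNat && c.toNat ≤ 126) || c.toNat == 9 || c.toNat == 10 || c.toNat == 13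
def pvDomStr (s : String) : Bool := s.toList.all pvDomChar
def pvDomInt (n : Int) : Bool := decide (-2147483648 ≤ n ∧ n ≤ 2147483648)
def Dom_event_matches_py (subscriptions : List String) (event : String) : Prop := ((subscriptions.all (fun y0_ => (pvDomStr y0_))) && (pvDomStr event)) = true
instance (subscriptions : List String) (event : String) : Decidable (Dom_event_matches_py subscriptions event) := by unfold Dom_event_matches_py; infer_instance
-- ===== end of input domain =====

-- B replaces A's two phases (set membership, then wildcard-prefix scan) by one
-- short-circuiting loop over the subscriptions; same result, simpler decomposition.

-- ===== PORT A =====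
-- str(item or "") on a string: item if nonempty, else "" (itself)
def pvOrEmpty (item : String) : String := if item == "" then "" else item

def event_matches_py (subscriptions : List String) (event : String) : Bool :=
  let normalized : PySem.Set String :=
    PySem.Set.ofList ((subscriptions.filter
        (fun item => PySem.Str.strip (pvOrEmpty item) ≠ "")).map
        (fun item => PySem.Str.strip (pvOrEmpty item)))
  if normalized.isEmpty then false
  else if PySem.Set.contains normalized event then true
  else
    let wildcard : List String :=
      (normalized.filter (fun value => PySem.Str.endswith value "*")).map
        (fun value => PySem.Str.slice value none (some (-1)))
    wildcard.any (fun pfx => PySem.Str.startswith event pfx)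

-- ===== PORT B =====
def event_matches_py_alt (subscriptions : List String) (event : String) : Bool :=
  match subscriptions with
  | [] => false
  | item :: rest =>
    let value := PySem.Str.strip (pvOrEmpty item)
    if value == "" then event_matches_py_alt rest event
    else if value == event then true
    else if PySem.Str.endswith value "*" &&
            PySem.Str.startswith event (PySem.Str.slice value none (some (-1))) then true
    else event_matches_py_alt rest event

-- ===== PRECONDITION & SPEC =====
def Spec_event_matches_py (subscriptions : List String) (event : String) (out : Bool) : Prop := out = event_matches_py_alt subscriptions event
instance (subscriptions : List String) (event : String) (out : Bool) : Decidable (Spec_event_matches_py subscriptions event out) := by unfold Spec_event_matches_py; infer_instance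

-- ===== CLAIM (what is proved, stated in full; the proofs are below) =====
def Claim_equal_event_matches_py : Prop := ∀ (subscriptions : List String) (event : String), Dom_event_matches_py subscriptions event → Spec_event_matches_py subscriptions event (event_matches_py subscriptions event)

-- ===== LEMMAS AND PROOFS =====

-- the per-item match test shared by both characterizations
def pvHit (event item : String) : Prop :=
  PySem.Str.strip (pvOrEmpty item) ≠ "" ∧
  (PySem.Str.strip (pvOrEmpty item) = event ∨
   (PySem.Str.endswith (PySem.Str.strip (pvOrEmpty item)) "*" = true ∧
    PySem.Str.startswith event (PySem.Str.slice (PySem.Str.strip (pvOrEmpty item)) none (some (-1))) = true))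

lemma alt_iff (subscriptions : List String) (event : String) :
    event_matches_py_alt subscriptions event = true ↔ ∃ item ∈ subscriptions, pvHit event item := by
  induction subscriptions with
  | nil => simp [event_matches_py_alt]
  | cons item rest ih =>
    simp only [event_matches_py_alt]
    by_cases h0 : PySem.Str.strip (pvOrEmpty item) = "" <;>
      by_cases h1 : PySem.Str.strip (pvOrEmpty item) = event <;>
      simp only [pvHit, List.mem_cons, exists_eq_or_imp] at * <;>
      simp [h0, h1, ih]

lemma a_iff (subscriptions : List String) (event : String) :
    event_matches_py subscriptions event = true ↔ ∃ item ∈ subscriptions, pvHit event item := by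
  simp only [event_matches_py]
  set l' := (subscriptions.filter
      (fun item => decide (PySem.Str.strip (pvOrEmpty item) ≠ ""))).map
      (fun item => PySem.Str.strip (pvOrEmpty item)) with hl'
  have hmem : ∀ v, v ∈ PySem.Set.ofList l' ↔ v ∈ l' := fun v => PySem.Set.mem_ofList l' v
  by_cases hemp : (PySem.Set.ofList l' : List String).isEmpty = true
  · have hnil : (PySem.Set.ofList l' : List String) = [] := List.isEmpty_iff.mp hemp
    have hl'nil : l' = [] := by
      rcases hl'e : l' with _ | ⟨v, vs⟩
      · rfl
      · have := (hmem v).mpr (by rw [hl'e]; exact List.mem_cons_self)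
        rw [hnil] at this; simp at this
    simp only [hemp, if_true, Bool.false_eq_true, false_iff]
    rintro ⟨x, hx, hhit⟩
    have : PySem.Str.strip (pvOrEmpty x) ∈ l' := by
      rw [hl']
      exact List.mem_map_of_mem (List.mem_filter.mpr ⟨hx, by simp [hhit.1]⟩)
    rw [hl'nil] at this; simp at this
  · have hemp' : (PySem.Set.ofList l' : List String).isEmpty = false := Bool.eq_false_iff.mpr hemp
    simp only [hemp', Bool.false_eq_true, if_false]
    by_cases hcont : PySem.Set.contains (PySem.Set.ofList l') event = true
    · simp only [hcont, if_true, true_iff]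
      have hev : event ∈ l' := (hmem event).mp (by
        simpa [PySem.Set.contains] using hcont)
      rw [hl'] at hev
      rcases List.mem_map.mp hev with ⟨x, hxf, hxe⟩
      rcases List.mem_filter.mp hxf with ⟨hx, hne⟩
      exact ⟨x, hx, by simpa using hne, Or.inl hxe⟩
    · have hcont' : PySem.Set.contains (PySem.Set.ofList l') event = false := Bool.eq_false_iff.mpr hcont
      simp only [hcont', Bool.false_eq_true, if_false]
      rw [List.any_eq_true]
      constructor
      · rintro ⟨pfx, hpfx, hst⟩
        rcases List.mem_map.mp hpfx with ⟨v, hvf, rfl⟩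
        rcases List.mem_filter.mp hvf with ⟨hvS, hend⟩
        have hv : v ∈ l' := (hmem v).mp hvS
        rw [hl'] at hv
        rcases List.mem_map.mp hv with ⟨x, hxf, hxe⟩
        rcases List.mem_filter.mp hxf with ⟨hx, hne⟩
        exact ⟨x, hx, by simpa using hne, Or.inr ⟨hxe ▸ hend, hxe ▸ hst⟩⟩
      · rintro ⟨x, hx, hne, hcase⟩
        have hvmem : PySem.Str.strip (pvOrEmpty x) ∈ PySem.Set.ofList l' := by
          apply (hmem _).mpr
          rw [hl']
          exact List.mem_map_of_mem (List.mem_filter.mpr ⟨hx, by simp [hne]⟩)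
        rcases hcase with heq | ⟨hend, hst⟩
        · exact absurd (by simpa [PySem.Set.contains] using (heq ▸ hvmem : event ∈ PySem.Set.ofList l')) hcont
        · refine ⟨PySem.Str.slice (PySem.Str.strip (pvOrEmpty x)) none (some (-1)), ?_, hst⟩
          exact List.mem_map_of_mem (List.mem_filter.mpr ⟨hvmem, hend⟩)

-- ===== VERDICT (by name: the statement is the Claim_ definition above) =====
theorem event_matches_py_spec : Claim_equal_event_matches_py := by
  intro subscriptions event _
  unfold Spec_event_matches_py
  rw [Bool.eq_iff_iff, a_iff, alt_iff]
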